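-- pv_equiv track=rewrite | github.com/CoinLQ/TripitakaPlatform | tasks/common.py | extract_line_separators
-- ===== SOURCE A (Python) =====
-- def extract_line_separators(text):
--     if text == '':
--         return []
--     separators = []
--     pos = 0
--     for c in text:
--         if c == '\n':
--             separators.append( (pos, c) )
--         elif c not in 'pb':
--             pos += 1
--     return separators
-- ===== SOURCE B (Python) =====
-- def extract_line_separators(text):
--     # Pass 1: table of running positions (pos counted over chars that are
--     # neither '\n' nor in 'pb').
--     prefix = []
--     pos = 0
--     for c in text:
--         prefix.append(pos)
--         if c != '\n' and c not in 'pb':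
--             pos += 1
--     # Pass 2: select the newline indices and emit their table entries.
--     return [(prefix[i], '\n') for i, c in enumerate(text) if c == '\n']
-- ===== Notes on version B (the rewrite author's own statement) =====
-- stated objective: alternative
-- what changed: Replaces A's single fused loop (conditional append + conditional counter) by two passes: one building a prefix table of running positions, and a comprehension over enumerate(text) selecting newline indices and reading the table.
import Mathlib
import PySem

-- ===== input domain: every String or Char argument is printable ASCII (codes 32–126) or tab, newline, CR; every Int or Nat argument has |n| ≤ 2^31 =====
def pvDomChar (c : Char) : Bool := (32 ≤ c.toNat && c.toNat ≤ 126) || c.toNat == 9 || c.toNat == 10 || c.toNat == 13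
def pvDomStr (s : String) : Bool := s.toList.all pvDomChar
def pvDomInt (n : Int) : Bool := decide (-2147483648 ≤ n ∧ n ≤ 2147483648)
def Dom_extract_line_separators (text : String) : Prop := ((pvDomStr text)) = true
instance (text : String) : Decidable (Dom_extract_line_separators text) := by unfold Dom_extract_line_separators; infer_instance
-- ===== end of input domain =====

-- B replaces A's single fused loop by two passes (prefix table of running positions, then a
-- filter over enumerated indices reading the table); alternative decomposition, same cost.


-- ===== PORT A =====
def extract_line_separators (text : String) : List (Int × String) :=
  if text = "" then []
  else
    (text.toList.foldl (fun (st : List (Int × String) × Int) c =>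
        if c = '\n' then (st.1 ++ [(st.2, String.ofList [c])], st.2)
        else if ¬ (c = 'p' ∨ c = 'b') then (st.1, st.2 + 1)
        else st) ([], 0)).1

-- ===== PORT B =====
def extract_line_separators_alt (text : String) : List (Int × String) :=
  let pre := (text.toList.foldl (fun (st : List Int × Int) c =>
        (st.1 ++ [st.2],
         if c ≠ '\n' ∧ ¬ (c = 'p' ∨ c = 'b') then st.2 + 1 else st.2)) ([], 0)).1
  (PySem.List.enumerate text.toList 0).filterMap (fun ic =>
      if ic.2 = '\n' then some (PySem.List.pyGetD pre ic.1 0, "\n") else none)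

-- ===== PRECONDITION & SPEC =====
def Spec_extract_line_separators (text : String) (out : List (Int × String)) : Prop := out = extract_line_separators_alt text
instance (text : String) (out : List (Int × String)) : Decidable (Spec_extract_line_separators text out) := by unfold Spec_extract_line_separators; infer_instance

-- ===== CLAIM (what is proved, stated in full; the proofs are below) =====
def Claim_equal_extract_line_separators : Prop := ∀ (text : String), Dom_extract_line_separators text → Spec_extract_line_separators text (extract_line_separators text)

-- ===== LEMMAS AND PROOFS =====

-- reference recursion: A's separators from a starting position
def sepsFrom : List Char → Int → List (Int × String)
  | [], _ => []
  | c :: cs, pos =>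
    if c = '\n' then (pos, "\n") :: sepsFrom cs pos
    else if ¬ (c = 'p' ∨ c = 'b') then sepsFrom cs (pos + 1)
    else sepsFrom cs pos

-- reference recursion: B's prefix table from a starting position
def preFrom : List Char → Int → List Int
  | [], _ => []
  | c :: cs, pos =>
    pos :: preFrom cs (if c ≠ '\n' ∧ ¬ (c = 'p' ∨ c = 'b') then pos + 1 else pos)

theorem preFrom_length (l : List Char) (pos : Int) : (preFrom l pos).length = l.length := by
  induction l generalizing pos with
  | nil => rfl
  | cons c cs ih => simp [preFrom, ih]

theorem foldA (l : List Char) (acc : List (Int × String)) (pos : Int) :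
    (l.foldl (fun (st : List (Int × String) × Int) c =>
        if c = '\n' then (st.1 ++ [(st.2, String.ofList [c])], st.2)
        else if ¬ (c = 'p' ∨ c = 'b') then (st.1, st.2 + 1)
        else st) (acc, pos)).1 = acc ++ sepsFrom l pos := by
  induction l generalizing acc pos with
  | nil => simp [sepsFrom]
  | cons c cs ih =>
    simp only [List.foldl]
    by_cases h1 : c = '\n'
    · rw [if_pos h1, ih]; simp [sepsFrom, h1]
    · rw [if_neg h1]
      by_cases h2 : c = 'p' ∨ c = 'b'
      · rw [if_neg (not_not_intro h2), ih]; simp [sepsFrom, h1, h2]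
      · rw [if_pos h2, ih]; simp [sepsFrom, h1, h2]

theorem foldB (l : List Char) (acc : List Int) (pos : Int) :
    (l.foldl (fun (st : List Int × Int) c =>
        (st.1 ++ [st.2],
         if c ≠ '\n' ∧ ¬ (c = 'p' ∨ c = 'b') then st.2 + 1 else st.2)) (acc, pos)).1
      = acc ++ preFrom l pos := by
  induction l generalizing acc pos with
  | nil => simp [preFrom]
  | cons c cs ih =>
    simp only [List.foldl]
    rw [ih]; simp [preFrom]

theorem filterB (l : List Char) (pos : Int) (k : Nat) (pre : List Int)
    (h : ∀ j : Nat, j < l.length → PySem.List.pyGetD pre ((k : Int) + (j : Int)) 0 = (preFrom l pos).getD j 0) :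
    (PySem.List.enumerate l (k : Int)).filterMap (fun ic =>
        if ic.2 = '\n' then some (PySem.List.pyGetD pre ic.1 0, "\n") else none)
      = sepsFrom l pos := by
  induction l generalizing pos k with
  | nil => simp [PySem.List.enumerate_nil, sepsFrom]
  | cons c cs ih =>
    have h0 : PySem.List.pyGetD pre (k : Int) 0 = pos := by
      have := h 0 (by simp)
      simpa [preFrom] using this
    have hrest : (PySem.List.enumerate cs ((k : Int) + 1)).filterMap (fun ic =>
        if ic.2 = '\n' then some (PySem.List.pyGetD pre ic.1 0, "\n") else none)
        = sepsFrom cs (if c ≠ '\n' ∧ ¬ (c = 'p' ∨ c = 'b') then pos + 1 else pos) := by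
      have := ih (if c ≠ '\n' ∧ ¬ (c = 'p' ∨ c = 'b') then pos + 1 else pos) (k + 1)
        (fun j hj => by
          have := h (j + 1) (by simpa using Nat.succ_lt_succ hj)
          simpa [preFrom, Nat.cast_add, add_comm, add_left_comm, add_assoc] using this)
      simpa [Nat.cast_add] using this
    by_cases h1 : c = '\n'
    · simp only [PySem.List.enumerate_cons, List.filterMap_cons, h1]
      simp [sepsFrom, h0, h1, hrest]
    · by_cases h2 : c = 'p' ∨ c = 'b'
      · simp only [PySem.List.enumerate_cons, List.filterMap_cons]
        simp [sepsFrom, h1, h2] at hrest ⊢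
        exact hrest
      · simp only [PySem.List.enumerate_cons, List.filterMap_cons]
        simp [sepsFrom, h1, h2] at hrest ⊢
        exact hrest

-- ===== VERDICT (by name: the statement is the Claim_ definition above) =====
theorem extract_line_separators_spec : Claim_equal_extract_line_separators := by
  intro text _
  unfold Spec_extract_line_separators extract_line_separators extract_line_separators_alt
  by_cases he : text = ""
  · subst he; simp [PySem.List.enumerate_nil]
  · rw [if_neg he, foldA, foldB]
    simp only [List.nil_append]
    exact (filterB text.toList 0 0 (preFrom text.toList 0) (fun j hj => by
      have hj' : j < (preFrom text.toList 0).length := by rw [preFrom_length]; exact hj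
      simp [PySem.List.pyGetD_natCast])).symm
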